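-- pv_equiv track=rewrite | github.com/cdrinconm/Cursos-Virtuales | ProgramacionCompetitiva/A.py | fibbonaci
-- ===== SOURCE A (Python) =====
-- def fibbonaci(k,n):
--     if n < 0:
--         return 0
--     if n == 0:
--         return 1
--     else:
--         array = [0,1]
--         for i in range(n):
--             actual = 0
--             if len(array) > k:
--                 array.pop(0)
--             for i in range(len(array)):
--                 actual += array[i] % 1000000009
--             array.append(actual % 1000000009)
--     return array[len(array)-1]
-- ===== SOURCE B (Python) =====
-- def fibbonaci(k, n):
--     # Sliding-window running sum: O(n) instead of re-summing the window each step.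
--     M = 1000000009
--     if n < 0:
--         return 0
--     if n == 0:
--         return 1
--     buf = [0, 1]
--     head = 0          # window is buf[head:]
--     s = 1             # running sum of the window
--     last = 1
--     for _ in range(n):
--         if len(buf) - head > k:
--             s -= buf[head]
--             head += 1
--         last = s % M
--         buf.append(last)
--         s += last
--     return last
-- ===== Notes on version B (the rewrite author's own statement) =====
-- stated objective: faster
-- what changed: B keeps a running sum of the sliding window (updated by subtracting the evicted element and adding the new one, with a head index instead of pop(0)) rather than re-summing the whole window on every step.
import Mathlib
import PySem

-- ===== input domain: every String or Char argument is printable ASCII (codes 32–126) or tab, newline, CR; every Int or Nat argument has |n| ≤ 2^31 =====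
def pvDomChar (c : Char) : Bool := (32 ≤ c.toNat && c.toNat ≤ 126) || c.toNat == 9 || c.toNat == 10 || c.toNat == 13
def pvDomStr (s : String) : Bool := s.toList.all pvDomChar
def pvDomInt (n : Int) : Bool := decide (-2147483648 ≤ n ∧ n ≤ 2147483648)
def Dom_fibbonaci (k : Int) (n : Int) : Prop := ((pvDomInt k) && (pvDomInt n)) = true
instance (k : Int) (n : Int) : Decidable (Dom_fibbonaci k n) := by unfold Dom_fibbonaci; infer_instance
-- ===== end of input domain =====

-- B replaces A's per-step re-summation of the window by a running sum updated
-- incrementally (subtract the evicted head, add the appended value): O(n) vs O(n*k).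

-- ===== PORT A =====
-- one iteration of A's outer loop: pop(0) if the window exceeds k, re-sum it, append
def pvStepA (k : Int) (array : List Int) : List Int :=
  let array := if (array.length : Int) > k then array.drop 1 else array
  let actual := array.foldl (fun a x => a + PySem.Int.mod x 1000000009) 0
  array ++ [PySem.Int.mod actual 1000000009]

def fibbonaci (k : Int) (n : Int) : Int :=
  if n < 0 then 0
  else if n = 0 then 1
  else
    let array := (List.range n.toNat).foldl (fun arr _ => pvStepA k arr) [0, 1]
    array.getLastD 0   -- array[len(array)-1]; array is always nonempty

-- ===== PORT B =====
-- state: (buf, head, s, last); window is buf.drop head, s its running sum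
def pvStepB (k : Int) (st : List Int × Nat × Int × Int) : List Int × Nat × Int × Int :=
  let (buf, head, s, _) := st
  let (s, head) :=
    if (buf.length : Int) - (head : Int) > k then (s - buf.getD head 0, head + 1)
    else (s, head)
  let last := PySem.Int.mod s 1000000009
  (buf ++ [last], head, s + last, last)

def fibbonaci_alt (k : Int) (n : Int) : Int :=
  if n < 0 then 0
  else if n = 0 then 1
  else
    ((List.range n.toNat).foldl (fun st _ => pvStepB k st) ([0, 1], 0, 1, 1)).2.2.2

-- ===== PRECONDITION & SPEC =====
def Spec_fibbonaci (k : Int) (n : Int) (out : Int) : Prop := out = fibbonaci_alt k n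
instance (k : Int) (n : Int) (out : Int) : Decidable (Spec_fibbonaci k n out) := by unfold Spec_fibbonaci; infer_instance

-- ===== CLAIM (what is proved, stated in full; the proofs are below) =====
def Claim_equal_fibbonaci : Prop := ∀ (k : Int) (n : Int), Dom_fibbonaci k n → Spec_fibbonaci k n (fibbonaci k n)

-- ===== LEMMAS AND PROOFS =====

-- The coupling invariant between A's window and B's state
def pvInv (arr : List Int) (st : List Int × Nat × Int × Int) : Prop :=
  st.1.drop st.2.1 = arr ∧
  st.2.2.1 = arr.sum ∧
  st.2.2.2 = arr.getLastD 0 ∧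
  arr ≠ [] ∧
  (∀ x ∈ arr, 0 ≤ x ∧ x < 1000000009)

theorem pv_foldl_mod_sum (l : List Int) (h : ∀ x ∈ l, 0 ≤ x ∧ x < 1000000009) (c : Int) :
    l.foldl (fun a x => a + PySem.Int.mod x 1000000009) c = c + l.sum := by
  induction l generalizing c with
  | nil => simp
  | cons a t ih =>
    have ha := h a (List.mem_cons_self)
    have hmod : PySem.Int.mod a 1000000009 = a := by
      rw [PySem.Int.mod_eq_emod_of_pos (by norm_num)]
      exact Int.emod_eq_of_lt ha.1 ha.2
    simp only [List.foldl_cons, List.sum_cons, hmod,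
      ih (fun x hx => h x (List.mem_cons_of_mem _ hx))]
    ring

theorem pv_getD_of_drop (buf : List Int) (head : Nat) (a : Int) (t : List Int)
    (h : buf.drop head = a :: t) : buf.getD head 0 = a := by
  have h1 : buf[head]? = some a := by
    rw [← List.head?_drop, h]; rfl
  simp [List.getD_eq_getElem?_getD, h1]

theorem pv_step_inv (k : Int) (arr : List Int) (st : List Int × Nat × Int × Int)
    (h : pvInv arr st) : pvInv (pvStepA k arr) (pvStepB k st) := by
  obtain ⟨buf, head, s, last⟩ := st
  obtain ⟨hdrop, hsum, hlast, hne, hbnd⟩ := h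
  simp only at hdrop hsum hlast
  have hlt : head < buf.length := by
    by_contra hge
    have hnil : buf.drop head = [] := List.drop_eq_nil_of_le (by omega)
    rw [hdrop] at hnil; exact hne hnil
  have hlen : (arr.length : Int) = (buf.length : Int) - (head : Int) := by
    have : arr.length = buf.length - head := by rw [← hdrop, List.length_drop]
    omega
  obtain ⟨a, t, hat⟩ : ∃ a t, arr = a :: t := by
    cases arr with
    | nil => exact absurd rfl hne
    | cons a t => exact ⟨a, t, rfl⟩
  have hgd : buf.getD head 0 = a := pv_getD_of_drop buf head a t (by rw [hdrop, hat])
  have hbnd2 : ∀ x ∈ arr.drop 1, 0 ≤ x ∧ x < 1000000009 :=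
    fun x hx => hbnd x (List.mem_of_mem_drop hx)
  by_cases hk : (arr.length : Int) > k
  · -- pop branch
    have hk' : (buf.length : Int) - (head : Int) > k := by omega
    have hdrop' : buf.drop (head + 1) = arr.drop 1 := by
      rw [← hdrop, List.drop_drop, Nat.add_comm]
    have hs' : s - buf.getD head 0 = (arr.drop 1).sum := by
      rw [hgd, hsum, hat]; simp
    simp only [pvStepA, pvStepB, if_pos hk, if_pos hk',
      pv_foldl_mod_sum _ hbnd2, zero_add, hs']
    dsimp only [pvInv]
    refine ⟨?_, ?_, ?_, by simp, ?_⟩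
    · rw [List.drop_append_of_le_length (by omega), hdrop']
    · simp
    · simp
    · intro x hx
      simp only [List.mem_append, List.mem_singleton] at hx
      rcases hx with hx | hx
      · exact hbnd2 x hx
      · subst hx
        exact ⟨PySem.Int.mod_nonneg _ (by norm_num), PySem.Int.mod_lt _ (by norm_num)⟩
  · -- no-pop branch
    have hk' : ¬ ((buf.length : Int) - (head : Int) > k) := by omega
    simp only [pvStepA, pvStepB, if_neg hk, if_neg hk',
      pv_foldl_mod_sum _ hbnd, zero_add, hsum]
    dsimp only [pvInv]
    refine ⟨?_, ?_, ?_, by simp, ?_⟩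
    · rw [List.drop_append_of_le_length (by omega), hdrop]
    · simp
    · simp
    · intro x hx
      simp only [List.mem_append, List.mem_singleton] at hx
      rcases hx with hx | hx
      · exact hbnd x hx
      · subst hx
        exact ⟨PySem.Int.mod_nonneg _ (by norm_num), PySem.Int.mod_lt _ (by norm_num)⟩

theorem pv_fold_inv (k : Int) (m : Nat) :
    pvInv ((List.range m).foldl (fun arr _ => pvStepA k arr) [0, 1])
          ((List.range m).foldl (fun st _ => pvStepB k st) ([0, 1], 0, 1, 1)) := by
  induction m with
  | zero =>
    simp only [List.range_zero, List.foldl_nil]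
    refine ⟨rfl, by norm_num, rfl, by simp, ?_⟩
    intro x hx
    simp only [List.mem_cons, List.not_mem_nil, or_false] at hx
    rcases hx with h | h <;> subst h <;> norm_num
  | succ m ih =>
    simp only [List.range_succ, List.foldl_append, List.foldl_cons, List.foldl_nil]
    exact pv_step_inv k _ _ ih

-- ===== VERDICT (by name: the statement is the Claim_ definition above) =====
theorem fibbonaci_spec : Claim_equal_fibbonaci := by
  intro k n _
  unfold Spec_fibbonaci fibbonaci fibbonaci_alt
  by_cases h1 : n < 0
  · simp [h1]
  · by_cases h2 : n = 0
    · simp [h2]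
    · simp only [if_neg h1, if_neg h2]
      have := pv_fold_inv k n.toNat
      exact this.2.2.1.symm
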